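-- pv_equiv track=rewrite | github.com/SRI-AIC/InterestingnessXRL | interestingness_xrl/explainability/explanation/sequences.py | get_sequence_name
-- ===== SOURCE A (Python) =====
-- def get_sequence_name(seq_idx, seq_info):
--     s, _, seq, _ = seq_info
--     name = '#{}-s{}'.format(seq_idx, s)
--     trans_seq = []
--     for a, ns in seq:
--         name += '-a{}-s{}'.format(a, ns)
--         trans_seq.append((s, a, ns))
--         s = ns
--     return name, trans_seq
-- ===== SOURCE B (Python) =====
-- def get_sequence_name(seq_idx, seq_info):
--     s, _, seq, _ = seq_info
--     states = [s] + [ns for _, ns in seq]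
--     name = '#{}-s{}'.format(seq_idx, s) + ''.join(
--         '-a{}-s{}'.format(a, ns) for a, ns in seq)
--     trans_seq = [(cur, a, nxt) for cur, (a, nxt) in zip(states, seq)]
--     return name, trans_seq
-- ===== Notes on version B (the rewrite author's own statement) =====
-- stated objective: alternative
-- what changed: Replaces the single loop that mutates a scalar running state and two accumulators with a two-phase version: first materialize the full state chain, then zip consecutive states with the actions for the transitions and join pre-formatted pieces for the name.
import Mathlib
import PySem

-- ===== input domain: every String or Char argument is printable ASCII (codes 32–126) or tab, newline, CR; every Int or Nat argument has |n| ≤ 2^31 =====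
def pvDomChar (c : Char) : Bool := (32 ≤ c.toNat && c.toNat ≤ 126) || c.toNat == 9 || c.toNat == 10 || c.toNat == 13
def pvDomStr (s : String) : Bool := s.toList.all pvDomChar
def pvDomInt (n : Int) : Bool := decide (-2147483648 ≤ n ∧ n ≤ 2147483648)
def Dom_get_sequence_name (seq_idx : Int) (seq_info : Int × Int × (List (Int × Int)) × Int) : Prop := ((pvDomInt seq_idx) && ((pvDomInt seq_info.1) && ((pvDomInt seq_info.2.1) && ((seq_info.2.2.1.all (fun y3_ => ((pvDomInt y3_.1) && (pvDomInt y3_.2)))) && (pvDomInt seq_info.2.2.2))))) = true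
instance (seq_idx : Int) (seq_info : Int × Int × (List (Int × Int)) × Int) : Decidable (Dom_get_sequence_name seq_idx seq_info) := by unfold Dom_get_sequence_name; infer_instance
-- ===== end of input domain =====

-- B rebuilds the same name/transitions two-phase (state chain + zip/join) instead of threading a scalar state; objective: alternative decomposition.

-- ===== PORT A =====
-- for a, ns in seq: name += …; trans_seq.append((s,a,ns)); s = ns
def get_sequence_name (seq_idx : Int) (seq_info : Int × Int × (List (Int × Int)) × Int) : String × (List (Int × Int × Int)) :=
  let s := seq_info.1
  let seq := seq_info.2.2.1
  let name := "#" ++ PySem.Int.toStr seq_idx ++ "-s" ++ PySem.Int.toStr s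
  let r := seq.foldl
    (fun (st : String × List (Int × Int × Int) × Int) (p : Int × Int) =>
      (st.1 ++ "-a" ++ PySem.Int.toStr p.1 ++ "-s" ++ PySem.Int.toStr p.2,
       st.2.1 ++ [(st.2.2, p.1, p.2)], p.2))
    (name, ([] : List (Int × Int × Int)), s)
  (r.1, r.2.1)

-- ===== PORT B =====
def get_sequence_name_alt (seq_idx : Int) (seq_info : Int × Int × (List (Int × Int)) × Int) : String × (List (Int × Int × Int)) :=
  let s := seq_info.1
  let seq := seq_info.2.2.1
  let states := s :: seq.map (fun p => p.2)
  let name := "#" ++ PySem.Int.toStr seq_idx ++ "-s" ++ PySem.Int.toStr s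
      ++ PySem.Str.join "" (seq.map (fun p => "-a" ++ PySem.Int.toStr p.1 ++ "-s" ++ PySem.Int.toStr p.2))
  let trans_seq := (states.zip seq).map (fun q => (q.1, q.2.1, q.2.2))
  (name, trans_seq)

-- ===== PRECONDITION & SPEC =====
def Spec_get_sequence_name (seq_idx : Int) (seq_info : Int × Int × (List (Int × Int)) × Int) (out : String × (List (Int × Int × Int))) : Prop := out = get_sequence_name_alt seq_idx seq_info
instance (seq_idx : Int) (seq_info : Int × Int × (List (Int × Int)) × Int) (out : String × (List (Int × Int × Int))) : Decidable (Spec_get_sequence_name seq_idx seq_info out) := by unfold Spec_get_sequence_name; infer_instance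

-- ===== CLAIM (what is proved, stated in full; the proofs are below) =====
def Claim_equal_get_sequence_name : Prop := ∀ (seq_idx : Int) (seq_info : Int × Int × (List (Int × Int)) × Int), Dom_get_sequence_name seq_idx seq_info → Spec_get_sequence_name seq_idx seq_info (get_sequence_name seq_idx seq_info)

-- ===== LEMMAS AND PROOFS =====
theorem flatten_intersperse_nil (l : List (List Char)) :
    (List.intersperse ([] : List Char) l).flatten = l.flatten := by
  induction l with
  | nil => simp
  | cons a l ih => cases l <;> simp_all [List.intersperse]

theorem join_empty_cons (x : String) (xs : List String) :
    PySem.Str.join "" (x :: xs) = x ++ PySem.Str.join "" xs := by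
  simp [PySem.Str.join, PySem.Chars.join, List.intercalate, flatten_intersperse_nil,
    String.ofList_append, String.ofList_toList]

theorem gsn_loop (seq : List (Int × Int)) (s : Int) (nm : String) (acc : List (Int × Int × Int)) :
    seq.foldl
      (fun (st : String × List (Int × Int × Int) × Int) (p : Int × Int) =>
        (st.1 ++ "-a" ++ PySem.Int.toStr p.1 ++ "-s" ++ PySem.Int.toStr p.2,
         st.2.1 ++ [(st.2.2, p.1, p.2)], p.2))
      (nm, acc, s)
    = (nm ++ PySem.Str.join "" (seq.map (fun p => "-a" ++ PySem.Int.toStr p.1 ++ "-s" ++ PySem.Int.toStr p.2)),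
       acc ++ ((s :: seq.map (fun p => p.2)).zip seq).map (fun q => (q.1, q.2.1, q.2.2)),
       (seq.map (fun p => p.2)).getLastD s) := by
  induction seq generalizing s nm acc with
  | nil => simp [PySem.Str.join, PySem.Chars.join, List.intercalate]
  | cons p rest ih =>
      simp only [List.foldl_cons, ih, List.map_cons, List.zip_cons_cons, List.map,
        Prod.mk.injEq, join_empty_cons]
      refine ⟨by simp [String.append_assoc], by simp, ?_⟩
      cases rest <;> simp [List.getLastD]

-- ===== VERDICT (by name: the statement is the Claim_ definition above) =====
theorem get_sequence_name_spec : Claim_equal_get_sequence_name := by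
  intro seq_idx seq_info _
  unfold Spec_get_sequence_name get_sequence_name get_sequence_name_alt
  simp [gsn_loop]
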